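-- pv_equiv track=rewrite | github.com/Badokk/AdventOfCode18 | Python/Day_2/functions.py | analiseWord
-- ===== SOURCE A (Python) =====
-- def analiseWord(word):
--     word = sorted(word)
--
--     # Now, options are:
--     # - iterate over the word with a counter
--     # - cut string into pieces
--     has_two_of_a_kind = False
--     has_three_of_a_kind = False
--     uniqueCharacters = set(word)
--     for char in uniqueCharacters:
--         count = word.count(char)
--         if count == 2:
--             has_two_of_a_kind = True
--         if count == 3:
--             has_three_of_a_kind = True
--
--     return has_two_of_a_kind, has_three_of_a_kind
-- ===== SOURCE B (Python) =====
-- def analiseWord(word):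
--     s = sorted(word)
--     has_two_of_a_kind = False
--     has_three_of_a_kind = False
--     if not s:
--         return has_two_of_a_kind, has_three_of_a_kind
--     cur = s[0]
--     run = 1
--     for ch in s[1:]:
--         if ch == cur:
--             run += 1
--         else:
--             if run == 2:
--                 has_two_of_a_kind = True
--             if run == 3:
--                 has_three_of_a_kind = True
--             cur = ch
--             run = 1
--     if run == 2:
--         has_two_of_a_kind = True
--     if run == 3:
--         has_three_of_a_kind = True
--     return has_two_of_a_kind, has_three_of_a_kind
-- ===== Notes on version B (the rewrite author's own statement) =====
-- stated objective: faster
-- what changed: Replaces the set-of-unique-chars plus word.count inner scan with a single run-length pass over the sorted characters that sets each flag when a run ends with length 2 or 3.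
import Mathlib
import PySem

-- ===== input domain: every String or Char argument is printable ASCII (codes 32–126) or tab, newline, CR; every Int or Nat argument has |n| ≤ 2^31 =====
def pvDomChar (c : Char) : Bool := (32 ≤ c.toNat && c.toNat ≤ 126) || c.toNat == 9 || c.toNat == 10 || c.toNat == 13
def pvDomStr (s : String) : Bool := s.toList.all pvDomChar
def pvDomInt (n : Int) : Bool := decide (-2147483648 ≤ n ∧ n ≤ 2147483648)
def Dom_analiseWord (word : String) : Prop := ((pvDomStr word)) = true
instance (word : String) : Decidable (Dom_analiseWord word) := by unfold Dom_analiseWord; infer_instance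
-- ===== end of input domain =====

-- B replaces A's unique-character set plus per-character word.count scan with a single
-- run-length pass over the sorted characters (objective: faster by a constant factor).

-- ===== PORT A =====
def analiseWord (word : String) : Bool × Bool :=
  let w := PySem.List.sorted word.toList (fun c => c) false
  let uniq := PySem.Set.ofList w
  uniq.foldl (fun (p : Bool × Bool) c =>
    let count := PySem.List.count w c
    let p := if count == 2 then (true, p.2) else p
    if count == 3 then (p.1, true) else p) (false, false)

-- ===== PORT B =====
-- the run-length loop of Source B: cur = current run's char, run = its length so far
def bGo : List Char → Char → Nat → Bool → Bool → Bool × Bool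
  | [], _, run, two, three => (two || decide (run = 2), three || decide (run = 3))
  | c :: rest, cur, run, two, three =>
    if c == cur then bGo rest cur (run + 1) two three
    else bGo rest c 1 (two || decide (run = 2)) (three || decide (run = 3))

def analiseWord_alt (word : String) : Bool × Bool :=
  match PySem.List.sorted word.toList (fun c => c) false with
  | [] => (false, false)
  | h :: t => bGo t h 1 false false

-- ===== PRECONDITION & SPEC =====
def Spec_analiseWord (word : String) (out : Bool × Bool) : Prop := out = analiseWord_alt word
instance (word : String) (out : Bool × Bool) : Decidable (Spec_analiseWord word out) := by unfold Spec_analiseWord; infer_instance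

-- ===== CLAIM (what is proved, stated in full; the proofs are below) =====
def Claim_equal_analiseWord : Prop := ∀ (word : String), Dom_analiseWord word → Spec_analiseWord word (analiseWord word)

-- ===== LEMMAS AND PROOFS =====

-- both sides compute, for k = 2 and k = 3: "some character occurs exactly k times in w"
def hasCount (w : List Char) (k : Nat) : Bool := decide (∃ c ∈ w, w.count c = k)

-- A's fold accumulates the two flags by disjunction
def fA (w : List Char) (p : Bool × Bool) (c : Char) : Bool × Bool :=
  let count := PySem.List.count w c
  let p := if count == 2 then (true, p.2) else p
  if count == 3 then (p.1, true) else p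

theorem fA_eq (w : List Char) (c : Char) (a b : Bool) :
    fA w (a, b) c = (a || (w.count c == 2), b || (w.count c == 3)) := by
  unfold fA
  simp only [PySem.List.count]
  by_cases h2 : w.count c = 2 <;> by_cases h3 : w.count c = 3 <;> simp [h2, h3]

theorem foldA_eq (w : List Char) (u : List Char) (a b : Bool) :
    u.foldl (fA w) (a, b)
    = (a || u.any (fun c => w.count c == 2), b || u.any (fun c => w.count c == 3)) := by
  induction u generalizing a b with
  | nil => simp
  | cons c rest ih =>
    rw [List.foldl_cons, fA_eq, ih]
    simp [Bool.or_assoc]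

theorem analiseWord_eq (word : String) :
    analiseWord word =
      (hasCount (PySem.List.sorted word.toList (fun c => c) false) 2,
       hasCount (PySem.List.sorted word.toList (fun c => c) false) 3) := by
  show List.foldl (fA _) (false, false) _ = _
  rw [foldA_eq]
  set w := PySem.List.sorted word.toList (fun c => c) false with hw
  simp only [Prod.mk.injEq]
  refine ⟨?_, ?_⟩ <;>
  · simp only [Bool.false_or, hasCount]
    rw [Bool.eq_iff_iff]
    simp only [List.any_eq_true, decide_eq_true_eq, beq_iff_eq]
    constructor
    · rintro ⟨c, hc, h⟩; exact ⟨c, (PySem.Set.mem_ofList w c).1 hc, h⟩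
    · rintro ⟨c, hc, h⟩; exact ⟨c, (PySem.Set.mem_ofList w c).2 hc, h⟩

-- counting bookkeeping when the head continues the current run
theorem shift_same (c : Char) (rest : List Char) (run k : Nat) :
    (run + 1 + rest.count c = k ∨ ∃ d ∈ rest, d ≠ c ∧ rest.count d = k)
    ↔ (run + (c :: rest).count c = k ∨ ∃ d ∈ c :: rest, d ≠ c ∧ (c :: rest).count d = k) := by
  rw [List.count_cons_self]
  constructor
  · rintro (h | ⟨d, hd, hdc, h⟩)
    · left; omega
    · exact Or.inr ⟨d, List.mem_cons_of_mem _ hd, hdc, by rw [List.count_cons_of_ne (Ne.symm hdc), h]⟩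
  · rintro (h | ⟨d, hd, hdc, h⟩)
    · left; omega
    · rcases List.mem_cons.1 hd with rfl | hd
      · exact absurd rfl hdc
      · exact Or.inr ⟨d, hd, hdc, by rw [List.count_cons_of_ne (Ne.symm hdc)] at h; exact h⟩

-- counting bookkeeping when the head starts a new run (cur no longer occurs)
theorem shift_new (c cur : Char) (rest : List Char) (run k : Nat)
    (hne : ∀ d ∈ c :: rest, d ≠ cur) :
    ((run = k ∨ (1 + rest.count c = k ∨ ∃ d ∈ rest, d ≠ c ∧ rest.count d = k))
    ↔ (run + (c :: rest).count cur = k ∨ ∃ d ∈ c :: rest, d ≠ cur ∧ (c :: rest).count d = k)) := by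
  have hcount0 : (c :: rest).count cur = 0 :=
    List.count_eq_zero.2 (fun h => hne cur h rfl)
  rw [hcount0]
  constructor
  · rintro (h | h | ⟨d, hd, hdc, h⟩)
    · left; omega
    · exact Or.inr ⟨c, List.mem_cons_self, hne c List.mem_cons_self,
        by rw [List.count_cons_self]; omega⟩
    · exact Or.inr ⟨d, List.mem_cons_of_mem _ hd, hne d (List.mem_cons_of_mem _ hd),
        by rw [List.count_cons_of_ne (Ne.symm hdc), h]⟩
  · rintro (h | ⟨d, hd, hdc, h⟩)
    · left; omega
    · rcases List.mem_cons.1 hd with rfl | hd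
      · rw [List.count_cons_self] at h
        right; left; omega
      · by_cases hdc' : d = c
        · subst hdc'
          rw [List.count_cons_self] at h
          right; left; omega
        · right; right
          exact ⟨d, hd, hdc', by rw [List.count_cons_of_ne (Ne.symm hdc')] at h; exact h⟩

-- B's run-length invariant: processing l with current run (cur, run) and flags,
-- the flag for target k comes out true iff it was already true, the run of cur
-- completes to length k, or some character of l other than cur has count k in l.
theorem bGo_spec (l : List Char) (cur : Char) (run : Nat) (two three : Bool)
    (hs : l.Pairwise (· ≤ ·)) (hcur : ∀ x ∈ l, cur ≤ x) :
    bGo l cur run two three =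
      (two || decide (run + l.count cur = 2 ∨ ∃ c ∈ l, c ≠ cur ∧ l.count c = 2),
       three || decide (run + l.count cur = 3 ∨ ∃ c ∈ l, c ≠ cur ∧ l.count c = 3)) := by
  induction l generalizing cur run two three with
  | nil => simp [bGo]
  | cons c rest ih =>
    have hrest : rest.Pairwise (· ≤ ·) := hs.tail
    have hcrest : ∀ x ∈ rest, c ≤ x := fun x hx => (List.pairwise_cons.1 hs).1 x hx
    by_cases hc : c = cur
    · subst hc
      rw [bGo, if_pos (by simp)]
      rw [ih _ _ _ _ hrest hcrest]
      simp only [Prod.mk.injEq]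
      refine ⟨?_, ?_⟩ <;>
      · congr 1
        rw [decide_eq_decide]
        exact shift_same c rest run _
    · have hlt : ∀ x ∈ c :: rest, cur < x := by
        intro x hx
        have hcc : cur < c := lt_of_le_of_ne (hcur _ List.mem_cons_self) (fun e => hc e.symm)
        rcases List.mem_cons.1 hx with rfl | hx
        · exact hcc
        · exact lt_of_lt_of_le hcc (hcrest x hx)
      have hne : ∀ d ∈ c :: rest, d ≠ cur := fun d hd e => absurd (e ▸ hlt d hd) (lt_irrefl cur)
      rw [bGo, if_neg (by simpa using hc)]
      rw [ih _ _ _ _ hrest hcrest]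
      simp only [Prod.mk.injEq]
      refine ⟨?_, ?_⟩ <;>
      · rw [Bool.or_assoc]
        congr 1
        rw [Bool.eq_iff_iff]
        simp only [Bool.or_eq_true, decide_eq_true_eq]
        exact shift_new c cur rest run _ hne

-- reassembling the head run: the spec over (h :: t) in terms of counts in h :: t
theorem final_shift (h : Char) (t : List Char) (k : Nat) :
    (1 + t.count h = k ∨ ∃ d ∈ t, d ≠ h ∧ t.count d = k)
    ↔ (∃ c ∈ h :: t, (h :: t).count c = k) := by
  constructor
  · rintro (hh | ⟨d, hd, hdc, hk⟩)
    · exact ⟨h, List.mem_cons_self, by rw [List.count_cons_self]; omega⟩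
    · exact ⟨d, List.mem_cons_of_mem _ hd, by rw [List.count_cons_of_ne (Ne.symm hdc), hk]⟩
  · rintro ⟨d, hd, hk⟩
    by_cases hdc : d = h
    · subst hdc
      rw [List.count_cons_self] at hk
      left; omega
    · right
      rcases List.mem_cons.1 hd with rfl | hd
      · exact absurd rfl hdc
      · exact ⟨d, hd, hdc, by rw [List.count_cons_of_ne (Ne.symm hdc)] at hk; exact hk⟩

theorem analiseWord_alt_eq (word : String) :
    analiseWord_alt word =
      (hasCount (PySem.List.sorted word.toList (fun c => c) false) 2,
       hasCount (PySem.List.sorted word.toList (fun c => c) false) 3) := by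
  unfold analiseWord_alt
  have hp : (PySem.List.sorted word.toList (fun c => c) false).Pairwise (· ≤ ·) :=
    PySem.List.sorted_pairwise word.toList (fun c => c)
  cases hw : PySem.List.sorted word.toList (fun c => c) false with
  | nil => simp [hasCount]
  | cons h t =>
    rw [hw] at hp
    have hhd : ∀ x ∈ t, h ≤ x := fun x hx => (List.pairwise_cons.1 hp).1 x hx
    show bGo t h 1 false false = _
    rw [bGo_spec t h 1 false false hp.tail hhd]
    simp only [Prod.mk.injEq, hasCount]
    refine ⟨?_, ?_⟩ <;>
    · rw [Bool.false_or, decide_eq_decide]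
      exact final_shift h t _

-- ===== VERDICT (by name: the statement is the Claim_ definition above) =====
theorem analiseWord_spec : Claim_equal_analiseWord := by
  intro word _
  show analiseWord word = analiseWord_alt word
  rw [analiseWord_eq, analiseWord_alt_eq]
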